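-- pv_equiv track=rewrite | github.com/cjvogel1972/advent-of-code | 2015/day17/day.py | count_minimum_containers
-- ===== SOURCE A (Python) =====
-- from collections import Counter
--
-- def count_minimum_containers(container_combinations: list[list[int]]) -> int:
--     container_counts = Counter()
--     min_containers = float("inf")
--
--     for combination in container_combinations:
--         num_containers = len(combination)
--         container_counts[num_containers] += 1
--         min_containers = min(min_containers, num_containers)
--
--     return container_counts[min_containers]
-- ===== SOURCE B (Python) =====
-- def count_minimum_containers(container_combinations: list[list[int]]) -> int:
--     lengths = sorted(len(c) for c in container_combinations)
--     if not lengths: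
--         return 0
--     first = lengths[0]
--     k = 0
--     for v in lengths:
--         if v != first:
--             break
--         k += 1
--     return k
-- ===== Notes on version B (the rewrite author's own statement) =====
-- stated objective: alternative
-- what changed: Replaces A's single fused pass (length-frequency Counter plus running minimum, then one Counter lookup) with a sort-then-scan algorithm: sort the lengths ascending and return the length of the leading run of equal elements; no minimum is computed and no frequency table is kept.
import Mathlib
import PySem

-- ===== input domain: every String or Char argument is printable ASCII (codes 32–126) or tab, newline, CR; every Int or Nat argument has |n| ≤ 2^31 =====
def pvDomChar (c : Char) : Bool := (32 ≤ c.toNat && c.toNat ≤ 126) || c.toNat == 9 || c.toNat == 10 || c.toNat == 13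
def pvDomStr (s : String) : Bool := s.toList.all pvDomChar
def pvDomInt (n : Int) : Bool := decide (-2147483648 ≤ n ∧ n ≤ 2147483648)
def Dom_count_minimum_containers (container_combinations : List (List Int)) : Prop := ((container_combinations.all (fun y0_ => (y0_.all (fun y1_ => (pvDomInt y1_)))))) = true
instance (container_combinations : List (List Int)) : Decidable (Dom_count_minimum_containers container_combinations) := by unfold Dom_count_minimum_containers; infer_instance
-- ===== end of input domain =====

-- B replaces A's fused Counter-plus-running-minimum pass by sort-then-scan: sort the lengths
-- ascending and return the length of the leading run of equal elements; objective: alternative.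

-- ===== PORT A =====
-- A's float("inf") initial minimum is modeled as `none` (only ever compared/min'ed with int lengths,
-- and Counter[inf] on an empty input is the default 0, matched by the `none` branch).
def count_minimum_containers (container_combinations : List (List Int)) : Int :=
  let st := container_combinations.foldl
    (fun (st : PySem.Dict Int Int × Option Int) combination =>
      let num_containers : Int := combination.length
      (st.1.modify num_containers 0 (· + 1),
       match st.2 with
       | none => some num_containers
       | some m => some (min m num_containers)))
    (PySem.Dict.empty, none)
  match st.2 with
  | none => 0
  | some m => st.1.getD m 0

-- ===== PORT B =====
-- the for-loop with break: count the leading run of elements equal to `first`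
def pvRunLen (first : Int) : List Int → Nat
  | [] => 0
  | v :: t => if v ≠ first then 0 else 1 + pvRunLen first t

def count_minimum_containers_alt (container_combinations : List (List Int)) : Int :=
  let lengths := PySem.List.sorted (container_combinations.map (fun c => (c.length : Int))) (fun x => x)
  match lengths with
  | [] => 0
  | first :: _ => (pvRunLen first lengths : Int)

-- ===== PRECONDITION & SPEC =====
def Spec_count_minimum_containers (container_combinations : List (List Int)) (out : Int) : Prop := out = count_minimum_containers_alt container_combinations
instance (container_combinations : List (List Int)) (out : Int) : Decidable (Spec_count_minimum_containers container_combinations out) := by unfold Spec_count_minimum_containers; infer_instance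

-- ===== CLAIM (what is proved, stated in full; the proofs are below) =====
def Claim_equal_count_minimum_containers : Prop := ∀ (container_combinations : List (List Int)), Dom_count_minimum_containers container_combinations → Spec_count_minimum_containers container_combinations (count_minimum_containers container_combinations)

-- ===== LEMMAS AND PROOFS =====

-- A's loop updates the two state components independently, so it splits into two folds.
theorem pv_loop_split (ccs : List (List Int)) (d : PySem.Dict Int Int) (m : Option Int) :
    ccs.foldl
      (fun (st : PySem.Dict Int Int × Option Int) combination =>
        (st.1.modify (combination.length : Int) 0 (· + 1),
         match st.2 with
         | none => some (combination.length : Int)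
         | some m => some (min m (combination.length : Int))))
      (d, m)
    = ((ccs.map (fun c => (c.length : Int))).foldl (fun d v => d.modify v 0 (· + 1)) d,
       (ccs.map (fun c => (c.length : Int))).foldl
         (fun m y => match m with | none => some y | some m => some (min m y)) m) := by
  induction ccs generalizing d m with
  | nil => rfl
  | cons c t ih => simp [List.foldl, ih]

-- A's running-minimum fold, once started, is the plain min fold.
theorem pv_minfold_some (L : List Int) (a : Int) :
    L.foldl (fun m y => match m with | none => some y | some m => some (min m y)) (some a)
      = some (L.foldl min a) := by
  induction L generalizing a with
  | nil => rfl
  | cons x t ih => simp [List.foldl, ih]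

-- in a ≤-sorted list whose elements are all ≥ first, the leading run of `first` is its count
theorem pv_runlen_eq_count (first : Int) (t : List Int)
    (hge : ∀ z ∈ t, first ≤ z) (hp : t.Pairwise (· ≤ ·)) :
    pvRunLen first t = t.count first := by
  induction t with
  | nil => rfl
  | cons v t ih =>
    rcases List.pairwise_cons.mp hp with ⟨hv, hp'⟩
    by_cases hvf : v = first
    · subst hvf
      simp [pvRunLen, ih (fun z hz => hv z hz) hp']; omega
    · have hlt : first < v := lt_of_le_of_ne (hge v (List.mem_cons_self)) (Ne.symm hvf)
      have hnot : first ∉ v :: t := by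
        intro hmem
        rcases List.mem_cons.mp hmem with h | h
        · exact hvf h.symm
        · exact absurd (hv _ h) (not_le.mpr hlt)
      simp [pvRunLen, hvf, List.count_eq_zero.mpr hnot]

-- ===== VERDICT (by name: the statement is the Claim_ definition above) =====
theorem count_minimum_containers_spec : Claim_equal_count_minimum_containers := by
  intro ccs _
  unfold Spec_count_minimum_containers count_minimum_containers count_minimum_containers_alt
  cases ccs with
  | nil => rfl
  | cons c t =>
    rw [pv_loop_split]
    set L : List Int := (List.map (fun c => ((c.length : Int))) (c :: t)) with hL
    have hmin : L.foldl
        (fun m y => match m with | none => some y | some m => some (min m y)) none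
        = some ((List.map (fun c => ((c.length : Int))) t).foldl min (c.length : Int)) := by
      simp only [hL, List.map_cons, List.foldl_cons]
      exact pv_minfold_some _ _
    set m : Int := (List.map (fun c => ((c.length : Int))) t).foldl min (c.length : Int) with hm
    -- m is the minimum of L
    have hminL : PySem.List.min? L (fun y => y) = some m := by
      simp only [hL, List.map_cons]
      exact PySem.List.min?_id_cons _ _
    have hmmem : m ∈ L := PySem.List.min?_mem hminL
    have hmle : ∀ y ∈ L, m ≤ y := PySem.List.min?_isMin hminL
    -- the sorted list is nonempty with head = m
    have hsne : PySem.List.sorted L (fun x => x) ≠ [] := by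
      intro hnil
      rw [PySem.List.sorted_eq_nil_iff] at hnil
      simp [hL] at hnil
    obtain ⟨first, rest, hs⟩ := List.exists_cons_of_ne_nil hsne
    have hperm : (first :: rest).Perm L := hs ▸ PySem.List.sorted_perm L (fun x => x) false
    have hfle : ∀ y ∈ L, first ≤ y := fun y hy => PySem.List.key_head_sorted_le L (fun x => x) hs y hy
    have hfm : first = m := by
      have h1 : first ≤ m := hfle m hmmem
      have h2 : m ≤ first := hmle first (hperm.mem_iff.mp List.mem_cons_self)
      exact le_antisymm h1 h2
    have hpair : (first :: rest).Pairwise (· ≤ ·) := by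
      have := PySem.List.sorted_pairwise L (fun x => x)
      rw [hs] at this
      exact this
    rcases List.pairwise_cons.mp hpair with ⟨hfr, hpr⟩
    have hge : ∀ z ∈ first :: rest, first ≤ z := by
      intro z hz
      rcases List.mem_cons.mp hz with h | h
      · exact h ▸ le_refl _
      · exact hfr z h
    have hcount : pvRunLen first (first :: rest) = (first :: rest).count first :=
      pv_runlen_eq_count first (first :: rest) hge hpair
    have hcount2 : (first :: rest).count first = L.count first := hperm.count_eq first
    simp only [hmin, hs]
    rw [hcount, hcount2, hfm]
    -- A's side: Counter lookup at m is count of m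
    have hd := PySem.Dict.getD_foldl_modify_add_one L (PySem.Dict.empty : PySem.Dict Int Int) m
    simp only [hL] at hd ⊢
    rw [hd]
    simp [PySem.Dict.getD, PySem.Dict.get?, PySem.Dict.empty]
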